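-- pv_equiv track=rewrite | github.com/SamSpectre/TruckBenchmarking_PPT_AgenticSystem | src/tools/ppt_generator.py | determine_oem_category
-- ===== SOURCE A (Python) =====
-- from typing import Dict, List, Optional, Any
--
-- def determine_oem_category(vehicles: List[Dict]) -> str:
--     """Determine OEM category based on vehicle types"""
--     categories = [v.get('category', '').lower() for v in vehicles if v.get('category')]
--
--     if any('truck' in c for c in categories):
--         return "OEM - Commercial Trucks"
--     elif any('bus' in c for c in categories):
--         return "OEM - Bus & Coach"
--     elif any('van' in c for c in categories):
--         return "OEM - Light Commercial"
--     return "OEM - Commercial Vehicles"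
-- ===== SOURCE B (Python) =====
-- def determine_oem_category(vehicles):
--     """Determine OEM category based on vehicle types"""
--     has_truck = has_bus = has_van = False
--     for v in vehicles:
--         c = v.get('category')
--         if not c:
--             continue
--         lc = c.lower()
--         has_truck = has_truck or 'truck' in lc
--         has_bus = has_bus or 'bus' in lc
--         has_van = has_van or 'van' in lc
--     if has_truck:
--         return "OEM - Commercial Trucks"
--     if has_bus:
--         return "OEM - Bus & Coach"
--     if has_van:
--         return "OEM - Light Commercial"
--     return "OEM - Commercial Vehicles"
-- ===== Notes on version B (the rewrite author's own statement) =====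
-- stated objective: alternative
-- what changed: Single pass over the vehicles maintaining three presence flags instead of building an intermediate lowered-category list and scanning it up to three times with any().
import Mathlib
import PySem

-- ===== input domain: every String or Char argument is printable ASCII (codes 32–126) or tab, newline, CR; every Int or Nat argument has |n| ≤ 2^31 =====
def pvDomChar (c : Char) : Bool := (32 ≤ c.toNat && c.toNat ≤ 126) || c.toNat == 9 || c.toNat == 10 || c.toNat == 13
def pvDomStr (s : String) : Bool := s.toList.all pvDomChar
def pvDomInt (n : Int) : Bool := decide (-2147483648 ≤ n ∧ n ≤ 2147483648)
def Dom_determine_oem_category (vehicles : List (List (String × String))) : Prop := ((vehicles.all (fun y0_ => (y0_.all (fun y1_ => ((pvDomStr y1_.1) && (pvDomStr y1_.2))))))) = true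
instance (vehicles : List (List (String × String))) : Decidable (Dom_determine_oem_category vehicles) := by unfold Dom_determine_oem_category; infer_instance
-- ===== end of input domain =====

-- B replaces A's intermediate category list and three any() scans by one fold maintaining three presence flags.
-- ===== PORT A =====
def determine_oem_category (vehicles : List (List (String × String))) : String :=
  let categories :=
    (vehicles.filter (fun v => !((PySem.Dict.mk v).getD "category" "" == ""))).map
      (fun v => PySem.Str.lower ((PySem.Dict.mk v).getD "category" ""))
  if categories.any (fun c => PySem.Str.isIn "truck" c) then "OEM - Commercial Trucks"
  else if categories.any (fun c => PySem.Str.isIn "bus" c) then "OEM - Bus & Coach"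
  else if categories.any (fun c => PySem.Str.isIn "van" c) then "OEM - Light Commercial"
  else "OEM - Commercial Vehicles"

-- ===== PORT B =====
def determine_oem_category_alt (vehicles : List (List (String × String))) : String :=
  let flags := vehicles.foldl
    (fun (acc : Bool × Bool × Bool) v =>
      let c := (PySem.Dict.mk v).getD "category" ""
      if c == "" then acc
      else
        let lc := PySem.Str.lower c
        (acc.1 || PySem.Str.isIn "truck" lc,
         acc.2.1 || PySem.Str.isIn "bus" lc,
         acc.2.2 || PySem.Str.isIn "van" lc))
    (false, false, false)
  if flags.1 then "OEM - Commercial Trucks"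
  else if flags.2.1 then "OEM - Bus & Coach"
  else if flags.2.2 then "OEM - Light Commercial"
  else "OEM - Commercial Vehicles"

-- ===== PRECONDITION & SPEC =====
def Spec_determine_oem_category (vehicles : List (List (String × String))) (out : String) : Prop := out = determine_oem_category_alt vehicles
instance (vehicles : List (List (String × String))) (out : String) : Decidable (Spec_determine_oem_category vehicles out) := by unfold Spec_determine_oem_category; infer_instance

-- ===== CLAIM (what is proved, stated in full; the proofs are below) =====
def Claim_equal_determine_oem_category : Prop := ∀ (vehicles : List (List (String × String))), Dom_determine_oem_category vehicles → Spec_determine_oem_category vehicles (determine_oem_category vehicles)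

-- ===== LEMMAS AND PROOFS =====
theorem flags_eq (vs : List (List (String × String))) (acc : Bool × Bool × Bool) :
    vs.foldl
      (fun (acc : Bool × Bool × Bool) v =>
        let cc := (PySem.Dict.mk v).getD "category" ""
        if cc == "" then acc
        else
          let lc := PySem.Str.lower cc
          (acc.1 || PySem.Str.isIn "truck" lc,
           acc.2.1 || PySem.Str.isIn "bus" lc,
           acc.2.2 || PySem.Str.isIn "van" lc))
      acc
    = (acc.1 || ((vs.filter (fun v => !((PySem.Dict.mk v).getD "category" "" == ""))).map
              (fun v => PySem.Str.lower ((PySem.Dict.mk v).getD "category" ""))).any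
              (fun s => PySem.Str.isIn "truck" s),
       acc.2.1 || ((vs.filter (fun v => !((PySem.Dict.mk v).getD "category" "" == ""))).map
              (fun v => PySem.Str.lower ((PySem.Dict.mk v).getD "category" ""))).any
              (fun s => PySem.Str.isIn "bus" s),
       acc.2.2 || ((vs.filter (fun v => !((PySem.Dict.mk v).getD "category" "" == ""))).map
              (fun v => PySem.Str.lower ((PySem.Dict.mk v).getD "category" ""))).any
              (fun s => PySem.Str.isIn "van" s)) := by
  induction vs generalizing acc with
  | nil => simp
  | cons v vs ih =>
    rw [List.foldl_cons, ih]
    by_cases h : (PySem.Dict.mk v).getD "category" "" = ""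
    · simp [h]
    · simp [h, Bool.or_assoc]

-- ===== VERDICT (by name: the statement is the Claim_ definition above) =====
theorem determine_oem_category_spec : Claim_equal_determine_oem_category := by
  intro vehicles _
  unfold Spec_determine_oem_category determine_oem_category determine_oem_category_alt
  simp only [flags_eq, Bool.false_or]
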